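-- pv_equiv track=rewrite | github.com/narpfel/adventofcode | 2015/01/solution.py | final_floor
-- ===== SOURCE A (Python) =====
-- def final_floor(instructions):
--     floor = 0
--     for cmd in instructions:
--         if cmd == "(":
--             floor += 1
--         elif cmd == ")":
--             floor -= 1
--     return floor
-- ===== SOURCE B (Python) =====
-- def final_floor(instructions):
--     return instructions.count("(") - instructions.count(")")
-- ===== Notes on version B (the rewrite author's own statement) =====
-- stated objective: simpler
-- what changed: Replaces the per-character accumulating loop with two independent str.count scans and a subtraction.
import Mathlib
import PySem

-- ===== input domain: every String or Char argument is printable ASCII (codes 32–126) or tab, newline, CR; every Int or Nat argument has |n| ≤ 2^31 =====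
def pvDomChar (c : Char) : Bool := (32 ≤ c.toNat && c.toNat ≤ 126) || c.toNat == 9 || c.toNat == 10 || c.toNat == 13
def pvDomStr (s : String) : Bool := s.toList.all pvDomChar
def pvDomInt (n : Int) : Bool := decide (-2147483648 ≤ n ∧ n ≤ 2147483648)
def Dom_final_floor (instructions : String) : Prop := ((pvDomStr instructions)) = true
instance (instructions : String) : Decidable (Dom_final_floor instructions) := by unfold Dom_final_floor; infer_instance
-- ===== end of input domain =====

-- B replaces A's per-character accumulating loop with two independent str.count scans subtracted (simpler).


-- ===== PORT A =====
-- floor = 0; for cmd in instructions: if '(' then +1 elif ')' then -1; return floor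
def final_floor (instructions : String) : Int :=
  instructions.toList.foldl
    (fun floor cmd => if cmd = '(' then floor + 1 else if cmd = ')' then floor - 1 else floor) 0

-- ===== PORT B =====
-- return instructions.count("(") - instructions.count(")")
def final_floor_alt (instructions : String) : Int :=
  (PySem.Str.count instructions "(" : Int) - (PySem.Str.count instructions ")" : Int)

-- ===== PRECONDITION & SPEC =====
def Spec_final_floor (instructions : String) (out : Int) : Prop := out = final_floor_alt instructions
instance (instructions : String) (out : Int) : Decidable (Spec_final_floor instructions out) := by unfold Spec_final_floor; infer_instance

-- ===== CLAIM (what is proved, stated in full; the proofs are below) =====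
def Claim_equal_final_floor : Prop := ∀ (instructions : String), Dom_final_floor instructions → Spec_final_floor instructions (final_floor instructions)

-- ===== LEMMAS AND PROOFS =====

-- Chars.count.go with a single-character needle is List.count.
theorem go_single (c : Char) : ∀ (fuel : Nat) (l : List Char) (acc : Nat), l.length ≤ fuel →
    PySem.Chars.count.go [c] fuel l acc = acc + l.count c := by
  intro fuel
  induction fuel with
  | zero => intro l acc h
            have : l = [] := List.length_eq_zero_iff.mp (Nat.le_zero.mp h)
            subst this; simp [PySem.Chars.count.go]
  | succ n ih =>
    intro l acc h
    cases l with
    | nil => simp [PySem.Chars.count.go]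
    | cons x t =>
      have hlen : t.length ≤ n := by simpa using h
      by_cases hx : c = x
      · subst hx
        simp only [PySem.Chars.count.go, List.isPrefixOf, BEq.rfl, Bool.true_and]
        simp only [if_true, List.length_singleton, List.drop_succ_cons, List.drop_zero]
        rw [ih t (acc + 1) hlen]
        simp
        omega
      · simp only [PySem.Chars.count.go, List.isPrefixOf, Bool.and_eq_true, beq_iff_eq]
        rw [if_neg (by simp; exact hx)]
        rw [ih t acc hlen]
        simp [Ne.symm hx]

-- str.count of a single character is the character count of the character list.
theorem str_count_single (s : String) (c : Char) (h : (String.mk [c]).toList = [c]) :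
    PySem.Str.count s (String.mk [c]) = s.toList.count c := by
  rw [PySem.Str.count_eq, h]
  simp only [PySem.Chars.count]
  rw [if_neg (by simp)]
  rw [go_single c _ _ 0 le_rfl]; omega

-- The accumulating loop equals the difference of the two counts.
theorem fold_eq_counts (l : List Char) : ∀ (acc : Int),
    l.foldl (fun floor cmd => if cmd = '(' then floor + 1 else if cmd = ')' then floor - 1 else floor) acc
      = acc + (l.count '(' : Int) - (l.count ')' : Int) := by
  induction l with
  | nil => intro acc; simp
  | cons x t ih =>
    intro acc
    simp only [List.foldl_cons, List.count_cons, ih]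
    by_cases h1 : x = '('
    · simp [h1]; omega
    · by_cases h2 : x = ')'
      · simp [h1, h2]; omega
      · rw [if_neg h1, if_neg h2]; simp [h1, h2]

-- ===== VERDICT (by name: the statement is the Claim_ definition above) =====
theorem final_floor_spec : Claim_equal_final_floor := by
  intro s _
  unfold Spec_final_floor final_floor final_floor_alt
  rw [show "(" = String.mk ['('] from rfl, show ")" = String.mk [')'] from rfl,
    str_count_single s '(' rfl, str_count_single s ')' rfl, fold_eq_counts]
  omega
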